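-- pv_equiv track=rewrite | github.com/sgfn/miscellaneous | uni/s1_wdi/kol-1-prz-2.py | is_sum_ok
-- ===== SOURCE A (Python) =====
-- from math import isqrt
--
-- def prime_sieve(val):
--     tab = [True for _ in range(val+1)]
--     tab[0] = tab[1] = False
--     for i in range(2, isqrt(val)):
--         if tab[i] == True:
--             temp = i*2
--             while temp < val+1:
--                 tab[temp] = False
--                 temp += i
--     return tab
--
-- def is_sum_ok(val):
--     a = prime_sieve(val//2+1)
--     t = len(a)
--     for i in range(t):
--         if a[i]:
--             for j in range(t):
--                 if a[j]:
--                     if val == i*j: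
--                         return True
--     return False
-- ===== SOURCE B (Python) =====
-- from math import isqrt
--
-- def prime_sieve(val):
--     tab = [True for _ in range(val+1)]
--     tab[0] = tab[1] = False
--     for i in range(2, isqrt(val)):
--         if tab[i] == True:
--             temp = i*2
--             while temp < val+1:
--                 tab[temp] = False
--                 temp += i
--     return tab
--
-- def is_sum_ok(val):
--     # single pass: val = i*j with both sieve-prime iff some sieve-prime i
--     # divides val and the cofactor val//i is a sieve-prime below the bound
--     a = prime_sieve(val//2+1)
--     t = len(a)
--     for i in range(2, t):
--         if a[i] and val % i == 0:
--             j = val // i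
--             if j < t and a[j]:
--                 return True
--     return False
-- ===== Notes on version B (the rewrite author's own statement) =====
-- stated objective: faster
-- what changed: replaces A's quadratic double scan over all sieve-prime pairs (i,j) testing val == i*j by a single pass over sieve-primes i that checks divisibility val % i == 0 and looks up the cofactor val//i in the same sieve table
import Mathlib
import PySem

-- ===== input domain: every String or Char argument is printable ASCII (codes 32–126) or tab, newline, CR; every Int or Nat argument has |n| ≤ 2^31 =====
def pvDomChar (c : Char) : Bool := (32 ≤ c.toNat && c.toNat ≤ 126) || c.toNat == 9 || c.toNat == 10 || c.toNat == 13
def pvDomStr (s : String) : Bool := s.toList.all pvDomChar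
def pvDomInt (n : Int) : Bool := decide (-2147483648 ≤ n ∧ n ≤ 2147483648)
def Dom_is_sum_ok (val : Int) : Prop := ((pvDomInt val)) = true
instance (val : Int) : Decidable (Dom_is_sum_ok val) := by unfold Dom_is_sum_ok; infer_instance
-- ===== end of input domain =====

-- B replaces A's quadratic double scan over prime pairs by a single divisor pass
-- over the same sieve (objective: faster; return-value equivalence for val >= 0).


-- ===== PORT A =====
-- prime_sieve, shared verbatim by A and B (Source B keeps A's helper unchanged).
-- All indices written (`.toNat`) are nonnegative and in range on Pre_, so
-- List.set / List.getD are exact for Python's tab[...] there.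
def primeSieveCross (i : Int) (n : Nat) (tab : List Bool) : List Bool :=
  (PySem.List.pyRange (i*2) ((n : Int)+1) i).foldl
    (fun t temp => t.set temp.toNat false) tab

def primeSieve (n : Nat) : List Bool :=
  let tab := ((List.replicate (n+1) true).set 0 false).set 1 false
  (PySem.List.pyRange 2 (Nat.sqrt n) 1).foldl
    (fun tab i => if tab.getD i.toNat false = true then primeSieveCross i n tab else tab)
    tab

-- A: for i in range(t): if a[i]: for j in range(t): if a[j]: if val == i*j: return True
def is_sum_ok (val : Int) : Bool :=
  let a := primeSieve (PySem.Int.floordiv val 2 + 1).toNat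
  let t := a.length
  (List.range t).any (fun i =>
    a.getD i false &&
      (List.range t).any (fun j =>
        a.getD j false && decide (val = (i : Int) * (j : Int))))

-- ===== PORT B =====
-- B: for i in range(2, t): if a[i] and val % i == 0: j = val//i; if j < t and a[j]: return True
def is_sum_ok_alt (val : Int) : Bool :=
  let a := primeSieve (PySem.Int.floordiv val 2 + 1).toNat
  let t := a.length
  (PySem.List.pyRange 2 (t : Int) 1).any (fun i =>
    a.getD i.toNat false && (PySem.Int.mod val i == 0) &&
      (decide (PySem.Int.floordiv val i < (t : Int)) &&
        a.getD (PySem.Int.floordiv val i).toNat false))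

-- ===== PRECONDITION & SPEC =====
-- A raises IndexError for val < 0 (sieve table too short for tab[0]=tab[1]=False).
def Pre_is_sum_ok (val : Int) : Prop := 0 ≤ val
instance (val : Int) : Decidable (Pre_is_sum_ok val) := by unfold Pre_is_sum_ok; infer_instance
def pvWitness_is_sum_ok : Int := (6)

def Spec_is_sum_ok (val : Int) (out : Bool) : Prop := out = is_sum_ok_alt val
instance (val : Int) (out : Bool) : Decidable (Spec_is_sum_ok val out) := by unfold Spec_is_sum_ok; infer_instance

-- ===== CLAIM (what is proved, stated in full; the proofs are below) =====
def Claim_equal_is_sum_ok : Prop := ∀ (val : Int), Dom_is_sum_ok val → Pre_is_sum_ok val → Spec_is_sum_ok val (is_sum_ok val)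

-- ===== LEMMAS AND PROOFS =====

-- setting only at indices ≥ 2 leaves entries 0 and 1 untouched
theorem foldl_set_ge_two_getD_low (L : List Int) (tab : List Bool) (k : Nat)
    (hk : k ≤ 1) (hL : ∀ x ∈ L, 2 ≤ x) :
    (L.foldl (fun t temp => t.set temp.toNat false) tab).getD k false = tab.getD k false := by
  induction L generalizing tab with
  | nil => rfl
  | cons x xs ih =>
    have hx : 2 ≤ x := hL x (by simp)
    have hne : x.toNat ≠ k := by omega
    simp only [List.foldl_cons]
    rw [ih _ (fun y hy => hL y (by simp [hy]))]
    simp [List.getD, List.getElem?_set_ne hne]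

theorem cross_getD_low (i : Int) (n : Nat) (tab : List Bool) (k : Nat)
    (hk : k ≤ 1) (hi : 2 ≤ i) :
    (primeSieveCross i n tab).getD k false = tab.getD k false := by
  unfold primeSieveCross
  refine foldl_set_ge_two_getD_low _ _ _ hk ?_
  intro x hx
  have := ((PySem.List.mem_pyRange_iff_of_pos (by omega : (0:Int) < i)) x).1 hx
  omega

theorem sieve_fold_getD_low (n : Nat) (L : List Int) (tab : List Bool) (k : Nat)
    (hk : k ≤ 1) (hL : ∀ x ∈ L, 2 ≤ x) :
    (L.foldl (fun tab i => if tab.getD i.toNat false = true then primeSieveCross i n tab else tab)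
        tab).getD k false = tab.getD k false := by
  induction L generalizing tab with
  | nil => rfl
  | cons x xs ih =>
    have hx : 2 ≤ x := hL x (by simp)
    simp only [List.foldl_cons]
    rw [ih _ (fun y hy => hL y (by simp [hy]))]
    split
    · exact cross_getD_low x n tab k hk hx
    · rfl

theorem primeSieve_getD_low (n : Nat) (k : Nat) (hk : k ≤ 1) :
    (primeSieve n).getD k false = false := by
  unfold primeSieve
  rw [sieve_fold_getD_low n _ _ k hk]
  · interval_cases k
    · rcases n with _ | m
      · simp [List.getD]
      · simp [List.getD]
    · rcases n with _ | m
      · simp [List.getD]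
      · simp [List.getD]
  · intro x hx
    exact ((PySem.List.mem_pyRange_one).1 hx).1

-- the heart: on a table whose entries 0 and 1 are false, A's pair search equals
-- B's divisor pass, for any 0 ≤ val
theorem any_pair_eq_any_div (a : List Bool) (val : Int)
    (h0 : a.getD 0 false = false) (h1 : a.getD 1 false = false) (hval : 0 ≤ val) :
    ((List.range a.length).any (fun i =>
        a.getD i false &&
          (List.range a.length).any (fun j =>
            a.getD j false && decide (val = (i : Int) * (j : Int)))))
    = ((PySem.List.pyRange 2 (a.length : Int) 1).any (fun i =>
        a.getD i.toNat false && (PySem.Int.mod val i == 0) &&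
          (decide (PySem.Int.floordiv val i < (a.length : Int)) &&
            a.getD (PySem.Int.floordiv val i).toNat false))) := by
  rw [Bool.eq_iff_iff]
  simp only [List.any_eq_true, List.mem_range, Bool.and_eq_true, decide_eq_true_eq,
    beq_iff_eq]
  constructor
  · rintro ⟨i, hi, hai, j, hj, haj, hij⟩
    have hi2 : 2 ≤ i := by
      rcases Nat.lt_or_ge i 2 with h | h
      · interval_cases i
        · rw [h0] at hai; exact absurd hai (by simp)
        · rw [h1] at hai; exact absurd hai (by simp)
      · exact h
    have hipos : (0:Int) < (i : Int) := by exact_mod_cast (by omega : 0 < i)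
    have hdiv : PySem.Int.floordiv val (i : Int) = (j : Int) := by
      rw [PySem.Int.floordiv_eq_iff_of_pos hipos]
      constructor <;> nlinarith
    refine ⟨(i : Int), (PySem.List.mem_pyRange_one).2
      ⟨by exact_mod_cast hi2, by exact_mod_cast hi⟩, ⟨?_, ?_⟩, ?_, ?_⟩
    · simpa using hai
    · rw [PySem.Int.mod_eq_zero_iff_dvd, hij]; exact dvd_mul_right _ _
    · rw [hdiv]; exact_mod_cast hj
    · rw [hdiv]; simpa using haj
  · rintro ⟨x, hxmem, ⟨hax, hmod⟩, hlt, haq⟩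
    obtain ⟨hx2, hxlt⟩ := (PySem.List.mem_pyRange_one).1 hxmem
    have hxpos : (0:Int) < x := by omega
    have hdvd : x ∣ val := (PySem.Int.mod_eq_zero_iff_dvd val x).1 hmod
    have hrec := PySem.Int.floordiv_mul_add_mod val x
    rw [hmod, add_zero] at hrec
    have hq0 : 0 ≤ PySem.Int.floordiv val x := by nlinarith
    refine ⟨x.toNat, by omega, ?_, (PySem.Int.floordiv val x).toNat, by omega, ?_, ?_⟩
    · exact hax
    · exact haq
    · rw [Int.toNat_of_nonneg (by omega), Int.toNat_of_nonneg hq0]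
      nlinarith

-- ===== VERDICT (by name: the statement is the Claim_ definition above) =====
theorem is_sum_ok_spec : Claim_equal_is_sum_ok := by
  intro val _ hpre
  unfold Spec_is_sum_ok is_sum_ok is_sum_ok_alt
  exact any_pair_eq_any_div _ val (primeSieve_getD_low _ 0 (by omega))
    (primeSieve_getD_low _ 1 (by omega)) hpre
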